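-- pv_equiv track=rewrite | github.com/DancingOnAir/LeetcodePythonSolution | UnionFind/1905_count_sub_islands.py | countSubIslands1
-- ===== SOURCE A (Python) =====
-- from typing import List
--
-- def countSubIslands1(grid1: List[List[int]], grid2: List[List[int]]) -> int:
--     m = len(grid1)
--     n = len(grid1[0])
--     parent = list(range(m * n + 1))
--
--     def find(x):
--         if x != parent[x]:
--             x = find(parent[x])
--         return x
--
--     def union(x, y):
--         p1 = find(x)
--         p2 = find(y)
--
--         if p1 != p2:
--             parent[p2] = p1
--
--     res = set()
--     for i in range(m):
--         for j in range(n):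
--             if grid2[i][j] == 0:
--                 continue
--
--             idx = i * n + j
--             if i > 0 and grid2[i - 1][j] == 1:
--                 union(idx - n, idx)
--             if j > 0 and grid2[i][j - 1] == 1:
--                 union(idx - 1, idx)
--
--     res = set()
--     abandon = set()
--     for i in range(m):
--         for j in range(n):
--             if grid2[i][j] == 1:
--                 root = find(i * n + j)
--                 res.add(root)
--                 if (grid1[i][j] == 0 and root in res) or root in abandon:
--                     res.remove(root)
--                     abandon.add(root)
--
--     return len(res)
-- ===== SOURCE B (Python) =====
-- def countSubIslands1(grid1, grid2):
--     m = len(grid1)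
--     n = len(grid1[0])
--
--     # eager connected-component labelling: label maps cell index -> current
--     # component label; a merge rewrites every occurrence of one label.
--     label = {}
--
--     def merge(la, lb):
--         if la != lb:
--             for k in label:
--                 if label[k] == lb:
--                     label[k] = la
--
--     for i in range(m):
--         for j in range(n):
--             if grid2[i][j] == 0:
--                 continue
--             idx = i * n + j
--             label[idx] = idx
--             if i > 0 and grid2[i - 1][j] == 1:
--                 merge(label[idx - n], label[idx])
--             if j > 0 and grid2[i][j - 1] == 1:
--                 merge(label[idx - 1], label[idx])
--
--     # good[L] stays True iff every 1-cell of component L sits on land in grid1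
--     good = {}
--     for i in range(m):
--         for j in range(n):
--             if grid2[i][j] == 1:
--                 L = label[i * n + j]
--                 good[L] = good.get(L, True) and grid1[i][j] != 0
--
--     return sum(good.values())
-- ===== Notes on version B (the rewrite author's own statement) =====
-- stated objective: alternative
-- what changed: Replaces the recursive union-find parent forest (and the res/abandon set juggling) with an eager connected-component labelling: a dict cell->label whose merge rewrites one label into the other, and a per-label boolean dict summed at the end.
import Mathlib
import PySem

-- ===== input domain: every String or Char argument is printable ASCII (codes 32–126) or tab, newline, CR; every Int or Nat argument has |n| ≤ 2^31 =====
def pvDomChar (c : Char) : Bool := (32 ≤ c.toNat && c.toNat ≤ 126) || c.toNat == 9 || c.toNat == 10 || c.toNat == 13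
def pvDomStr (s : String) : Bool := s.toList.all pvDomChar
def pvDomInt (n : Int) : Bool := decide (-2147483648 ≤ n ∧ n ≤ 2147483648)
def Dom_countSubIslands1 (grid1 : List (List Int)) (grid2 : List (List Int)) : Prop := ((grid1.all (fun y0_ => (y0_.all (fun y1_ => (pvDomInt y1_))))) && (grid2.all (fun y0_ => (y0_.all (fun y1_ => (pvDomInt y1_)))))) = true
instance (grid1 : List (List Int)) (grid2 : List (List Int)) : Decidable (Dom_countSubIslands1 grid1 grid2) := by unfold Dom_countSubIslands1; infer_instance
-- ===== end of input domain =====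

-- B replaces A's recursive union-find parent forest (and its res/abandon set juggling) by an
-- eager connected-component labelling (a dict cell→label rewritten on every merge, plus a
-- per-label boolean dict summed at the end); same result, proved equal on all of Pre_.

-- ===== PORT A =====
-- grid[i][j] accessor shared by both ports (in range on Pre_; Python raises IndexError outside,
-- which Pre_ excludes)
def pvG (g : List (List Int)) (i j : Int) : Int :=
  PySem.List.pyGetD (PySem.List.pyGetD g i []) j 0


-- find(x): recursion ported with fuel = len(parent), which always suffices (proved below)
def pvFindA (parent : List Int) : Nat → Int → Int
  | 0, x => x
  | fuel + 1, x =>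
      let p := PySem.List.pyGetD parent x x
      if x ≠ p then pvFindA parent fuel p else x

def pvUnionA (parent : List Int) (x y : Int) : List Int :=
  let p1 := pvFindA parent parent.length x
  let p2 := pvFindA parent parent.length y
  if p1 ≠ p2 then PySem.List.pySetD parent p2 p1 else parent

def countSubIslands1 (grid1 : List (List Int)) (grid2 : List (List Int)) : Int :=
  let m : Int := PySem.List.len grid1
  let n : Int := PySem.List.len (PySem.List.pyGetD grid1 0 [])
  let parent0 : List Int := PySem.List.pyRange 0 (m * n + 1) 1
  let parent : List Int :=
    (PySem.List.pyRange 0 m 1).foldl (fun parent i =>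
      (PySem.List.pyRange 0 n 1).foldl (fun parent j =>
        if pvG grid2 i j = 0 then parent
        else
          let idx := i * n + j
          let parent := if 0 < i ∧ pvG grid2 (i - 1) j = 1 then pvUnionA parent (idx - n) idx else parent
          if 0 < j ∧ pvG grid2 i (j - 1) = 1 then pvUnionA parent (idx - 1) idx else parent)
        parent) parent0
  let st : PySem.Set Int × PySem.Set Int :=
    (PySem.List.pyRange 0 m 1).foldl (fun st i =>
      (PySem.List.pyRange 0 n 1).foldl (fun st j =>
        if pvG grid2 i j = 1 then
          let root := pvFindA parent parent.length (i * n + j)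
          let res := PySem.Set.add st.1 root
          if (pvG grid1 i j = 0 ∧ PySem.Set.contains res root) ∨ PySem.Set.contains st.2 root then
            ((PySem.Set.remove? res root).getD res, PySem.Set.add st.2 root)
          else (res, st.2)
        else st) st)
      (PySem.Set.empty, PySem.Set.empty)
  PySem.Set.len st.1


-- ===== PORT B =====
-- merge(la, lb): rewrite every value lb in the label dict to la
def pvMergeB (label : PySem.Dict Int Int) (la lb : Int) : PySem.Dict Int Int :=
  if la ≠ lb then PySem.Dict.mk (label.items.map (fun p => if p.2 = lb then (p.1, la) else p))
  else label


def countSubIslands1_alt (grid1 : List (List Int)) (grid2 : List (List Int)) : Int :=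
  let m : Int := PySem.List.len grid1
  let n : Int := PySem.List.len (PySem.List.pyGetD grid1 0 [])
  let label : PySem.Dict Int Int :=
    (PySem.List.pyRange 0 m 1).foldl (fun label i =>
      (PySem.List.pyRange 0 n 1).foldl (fun label j =>
        if pvG grid2 i j = 0 then label
        else
          let idx := i * n + j
          let label1 := label.insert idx idx
          let label2 := if 0 < i ∧ pvG grid2 (i - 1) j = 1 then
              pvMergeB label1 (label1.getD (idx - n) 0) (label1.getD idx 0) else label1
          if 0 < j ∧ pvG grid2 i (j - 1) = 1 then
              pvMergeB label2 (label2.getD (idx - 1) 0) (label2.getD idx 0) else label2)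
        label) PySem.Dict.empty
  let good : PySem.Dict Int Bool :=
    (PySem.List.pyRange 0 m 1).foldl (fun good i =>
      (PySem.List.pyRange 0 n 1).foldl (fun good j =>
        if pvG grid2 i j = 1 then
          let L := label.getD (i * n + j) 0
          good.insert L (good.getD L true && decide (pvG grid1 i j ≠ 0))
        else good) good) PySem.Dict.empty
  (good.values.map (fun b => if b then (1 : Int) else 0)).sum


-- ===== PRECONDITION & SPEC =====
-- Pre_ is exactly the inputs on which the Python A returns normally: a non-empty grid1 (A reads
-- grid1[0]), grid2 covering the first m rows at width n when n > 0 (A reads grid2[i][j] for every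
-- i < m, j < n), and grid1[i][j] readable wherever grid2[i][j] == 1 (the only grid1 reads).
def Pre_countSubIslands1 (grid1 : List (List Int)) (grid2 : List (List Int)) : Prop :=
  grid1 ≠ [] ∧
  ((grid1.headI).length = 0 ∨
    (grid1.length ≤ grid2.length ∧
      ∀ i, i < grid1.length → (grid1.headI).length ≤ (grid2.getD i []).length)) ∧
  (∀ i, i < grid1.length → ∀ j, j < (grid1.headI).length →
    (grid2.getD i []).getD j 0 = 1 → j < (grid1.getD i []).length)

instance (grid1 : List (List Int)) (grid2 : List (List Int)) : Decidable (Pre_countSubIslands1 grid1 grid2) := by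
  unfold Pre_countSubIslands1; infer_instance

def pvWitness_countSubIslands1 : List (List Int) × List (List Int) :=
  ([[1, 0], [0, 1]], [[1, 1], [0, 1]])

def Spec_countSubIslands1 (grid1 : List (List Int)) (grid2 : List (List Int)) (out : Int) : Prop := out = countSubIslands1_alt grid1 grid2
instance (grid1 : List (List Int)) (grid2 : List (List Int)) (out : Int) : Decidable (Spec_countSubIslands1 grid1 grid2 out) := by unfold Spec_countSubIslands1; infer_instance

-- ===== CLAIM (what is proved, stated in full; the proofs are below) =====
def Claim_equal_countSubIslands1 : Prop := ∀ (grid1 : List (List Int)) (grid2 : List (List Int)), Dom_countSubIslands1 grid1 grid2 → Pre_countSubIslands1 grid1 grid2 → Spec_countSubIslands1 grid1 grid2 (countSubIslands1 grid1 grid2)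

-- ===== LEMMAS AND PROOFS =====

def pvEnt (parent : List Int) (x : Int) : Int := PySem.List.pyGetD parent x x

def pvIter (parent : List Int) : Nat → Int → Int
  | 0, x => x
  | d + 1, x => pvIter parent d (pvEnt parent x)

def pvFix (parent : List Int) (x : Int) : Prop := pvEnt parent x = x

def pvRoot (parent : List Int) (x : Int) : Int := pvFindA parent parent.length x

def pvNrc (parent : List Int) : Nat :=
  (List.range parent.length).countP (fun (k : Nat) => pvEnt parent ((k : Int)) != ((k : Int)))

structure PInv (N : Nat) (parent : List Int) : Prop where
  pos : 1 ≤ N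
  len : parent.length = N
  rng : ∀ x : Int, 0 ≤ x → x < (N : Int) → 0 ≤ pvEnt parent x ∧ pvEnt parent x < (N : Int)
  reach : ∀ x : Int, 0 ≤ x → x < (N : Int) → ∃ d, d ≤ pvNrc parent ∧ pvFix parent (pvIter parent d x)
  top : pvFix parent ((N : Int) - 1)

lemma pvIter_fix_stable (parent : List Int) (x : Int) (h : pvFix parent x) :
    ∀ d, pvIter parent d x = x := by
  intro d
  induction d with
  | zero => rfl
  | succ d ih =>
    show pvIter parent d (pvEnt parent x) = x
    rw [h, ih]

lemma pvFindA_eq_iter (parent : List Int) :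
    ∀ fuel d x, d < fuel → pvFix parent (pvIter parent d x) →
      pvFindA parent fuel x = pvIter parent d x := by
  intro fuel
  induction fuel with
  | zero => intro d x h; omega
  | succ fuel ih =>
    intro d x hd hfix
    by_cases hx : pvEnt parent x = x
    · rw [pvIter_fix_stable parent x hx d]
      simp [pvFindA]
      intro hne
      exact absurd hx (by simpa [pvEnt] using (Ne.symm hne))
    · have hxne : x ≠ PySem.List.pyGetD parent x x := fun h => hx (by simpa [pvEnt] using h.symm)
      cases d with
      | zero => exact absurd hfix hx
      | succ e =>
        show (if x ≠ PySem.List.pyGetD parent x x then pvFindA parent fuel (PySem.List.pyGetD parent x x) else x) = _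
        rw [if_pos hxne]
        exact ih e (pvEnt parent x) (by omega) hfix

lemma pvExists_first {P : Nat → Prop} : ∀ d, P d → ∃ d0, d0 ≤ d ∧ P d0 ∧ ∀ k, k < d0 → ¬ P k := by
  intro d
  induction d using Nat.strong_induction_on with
  | _ d ih =>
    intro hd
    by_cases h : ∃ k, k < d ∧ P k
    · obtain ⟨k, hk, hPk⟩ := h
      obtain ⟨d0, h1, h2, h3⟩ := ih k hk hPk
      exact ⟨d0, by omega, h2, h3⟩
    · exact ⟨d, le_rfl, hd, fun k hk hPk => h ⟨k, hk, hPk⟩⟩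

lemma pvIter_succ_right (parent : List Int) :
    ∀ d x, pvIter parent (d + 1) x = pvEnt parent (pvIter parent d x) := by
  intro d
  induction d with
  | zero => intro x; rfl
  | succ d ih => intro x; exact ih (pvEnt parent x)

lemma pvIter_rng {N : Nat} {parent : List Int}
    (hrng : ∀ x : Int, 0 ≤ x → x < (N : Int) → 0 ≤ pvEnt parent x ∧ pvEnt parent x < (N : Int)) :
    ∀ d x, 0 ≤ x → x < (N : Int) → 0 ≤ pvIter parent d x ∧ pvIter parent d x < (N : Int) := by
  intro d
  induction d with
  | zero => intro x h1 h2; exact ⟨h1, h2⟩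
  | succ d ih =>
    intro x h1 h2
    exact ih _ (hrng x h1 h2).1 (hrng x h1 h2).2

lemma pvNrc_lt {N : Nat} {parent : List Int} (hpos : 1 ≤ N) (hlen : parent.length = N)
    (htop : pvFix parent ((N : Int) - 1)) : pvNrc parent < N := by
  have hmem : N - 1 ∈ List.range parent.length := by
    rw [List.mem_range]; omega
  have hfalse : ¬ ((fun (k : Nat) => pvEnt parent ((k : Int)) != ((k : Int))) (N - 1) = true) := by
    simp only [bne_iff_ne, ne_eq, Decidable.not_not]
    have hc : ((N - 1 : Nat) : Int) = (N : Int) - 1 := by omega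
    rw [hc]
    exact htop
  unfold pvNrc
  have h1 : (List.range parent.length).countP (fun (k : Nat) => pvEnt parent ((k : Int)) != ((k : Int))) ≤ (List.range parent.length).length := List.countP_le_length
  have h2 : (List.range parent.length).countP (fun (k : Nat) => pvEnt parent ((k : Int)) != ((k : Int))) ≠ (List.range parent.length).length := by
    intro h
    exact hfalse ((List.countP_eq_length).mp h _ hmem)
  simpa [hlen] using lt_of_le_of_ne h1 h2

lemma pvRoot_spec {N : Nat} {parent : List Int} (hP : PInv N parent) (x : Int)
    (h1 : 0 ≤ x) (h2 : x < (N : Int)) :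
    ∃ d, d ≤ pvNrc parent ∧ pvRoot parent x = pvIter parent d x ∧
      pvFix parent (pvRoot parent x) := by
  obtain ⟨d, hd, hfix⟩ := hP.reach x h1 h2
  have hlt : d < parent.length := by
    have h1 := pvNrc_lt hP.pos hP.len hP.top
    have h2 := hP.len
    omega
  have := pvFindA_eq_iter parent parent.length d x hlt hfix
  exact ⟨d, hd, this, by rw [pvRoot, this]; exact hfix⟩

lemma pvRoot_of_fix {N : Nat} {parent : List Int} (hP : PInv N parent) (x : Int)
    (hfix : pvFix parent x) : pvRoot parent x = x :=
  pvFindA_eq_iter parent parent.length 0 x (by have := hP.pos; have := hP.len; omega) hfix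

lemma pvCountP_range_update {N c : Nat} (hc : c < N) (p q : Nat → Bool)
    (hpc : p c = false) (hqc : q c = true) (hagree : ∀ k, k ≠ c → p k = q k) :
    (List.range N).countP q = (List.range N).countP p + 1 := by
  induction N with
  | zero => omega
  | succ N ih =>
    rw [List.range_succ, List.countP_append, List.countP_append,
        List.countP_singleton, List.countP_singleton]
    by_cases h : c < N
    · rw [ih h, hagree N (by omega)]
      cases q N <;> simp
    · have hcN : c = N := by omega
      have heq : (List.range N).countP q = (List.range N).countP p := by
        apply List.countP_congr
        intro k hk
        rw [List.mem_range] at hk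
        rw [hagree k (by omega)]
      subst hcN
      rw [heq, hpc, hqc]
      simp

lemma pvEnt_set {N : Nat} {parent : List Int} (hlen : parent.length = N) (p1 p2 : Int)
    (h2a : 0 ≤ p2) (h2b : p2 < (N : Int)) (x : Int) (hx : 0 ≤ x) :
    pvEnt (PySem.List.pySetD parent p2 p1) x = if x = p2 then p1 else pvEnt parent x := by
  have hp2 : p2 = ((p2.toNat : Nat) : Int) := by omega
  have hx' : x = ((x.toNat : Nat) : Int) := by omega
  have hlt : p2.toNat < parent.length := by omega
  rw [pvEnt, pvEnt, hp2, hx',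
    PySem.List.pyGetD_pySetD_natCast parent p2.toNat x.toNat p1 _ hlt]
  by_cases h : x.toNat = p2.toNat
  · rw [if_pos h, if_pos (by omega)]
  · rw [if_neg h, if_neg (by omega)]

lemma pvIter_set_eq {N : Nat} {parent : List Int} (hP : PInv N parent) (p1 p2 : Int)
    (h2a : 0 ≤ p2) (h2b : p2 < (N : Int)) :
    ∀ k x, 0 ≤ x → x < (N : Int) → (∀ j, j < k → pvIter parent j x ≠ p2) →
      pvIter (PySem.List.pySetD parent p2 p1) k x = pvIter parent k x := by
  intro k
  induction k with
  | zero => intros; rfl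
  | succ k ih =>
    intro x hx1 hx2 hj
    show pvIter _ k (pvEnt (PySem.List.pySetD parent p2 p1) x) = pvIter parent k (pvEnt parent x)
    rw [pvEnt_set hP.len p1 p2 h2a h2b x hx1, if_neg (show x ≠ p2 from hj 0 (by omega))]
    exact ih (pvEnt parent x) (hP.rng x hx1 hx2).1 (hP.rng x hx1 hx2).2
      (fun j hjk => hj (j + 1) (by omega))

lemma pvUnion_effect {N : Nat} {parent : List Int} (hP : PInv N parent) (p1 p2 : Int)
    (hf1 : pvFix parent p1) (hf2 : pvFix parent p2) (hne : p1 ≠ p2)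
    (h1a : 0 ≤ p1) (h1b : p1 < (N : Int)) (h2a : 0 ≤ p2) (h2b : p2 < (N : Int))
    (htopne : p2 ≠ (N : Int) - 1) :
    PInv N (PySem.List.pySetD parent p2 p1) ∧
      (∀ x : Int, 0 ≤ x → x < (N : Int) →
        pvRoot (PySem.List.pySetD parent p2 p1) x =
          if pvRoot parent x = p2 then p1 else pvRoot parent x) := by
  have hlen' : (PySem.List.pySetD parent p2 p1).length = N := by
    rw [PySem.List.length_pySetD]; exact hP.len
  have hent : ∀ x, 0 ≤ x → pvEnt (PySem.List.pySetD parent p2 p1) x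
      = if x = p2 then p1 else pvEnt parent x := fun x hx => pvEnt_set hP.len p1 p2 h2a h2b x hx
  have htop' : pvFix (PySem.List.pySetD parent p2 p1) ((N : Int) - 1) := by
    rw [pvFix, hent _ (by have := hP.pos; omega), if_neg (fun h => htopne h.symm)]
    exact hP.top
  have hrng' : ∀ x : Int, 0 ≤ x → x < (N : Int) →
      0 ≤ pvEnt (PySem.List.pySetD parent p2 p1) x ∧
      pvEnt (PySem.List.pySetD parent p2 p1) x < (N : Int) := by
    intro x hx1 hx2
    rw [hent x hx1]
    split
    · exact ⟨h1a, h1b⟩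
    · exact hP.rng x hx1 hx2
  have hcast : ((p2.toNat : Nat) : Int) = p2 := by omega
  have hnrc' : pvNrc (PySem.List.pySetD parent p2 p1) = pvNrc parent + 1 := by
    unfold pvNrc
    rw [hlen', hP.len]
    apply pvCountP_range_update (c := p2.toNat) (by omega)
    · show (pvEnt parent ((p2.toNat : Nat) : Int) != ((p2.toNat : Nat) : Int)) = false
      rw [hcast]
      exact bne_eq_false_iff_eq.mpr hf2
    · show (pvEnt (PySem.List.pySetD parent p2 p1) ((p2.toNat : Nat) : Int) != ((p2.toNat : Nat) : Int)) = true
      rw [hcast, hent p2 h2a, if_pos rfl]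
      simpa using hne
    · intro k hk
      show (pvEnt parent _ != _) = (pvEnt (PySem.List.pySetD parent p2 p1) _ != _)
      rw [hent (k : Int) (by omega), if_neg (by omega)]
  have hnrclt : pvNrc (PySem.List.pySetD parent p2 p1) < N :=
    pvNrc_lt hP.pos hlen' htop'
  have key : ∀ x : Int, 0 ≤ x → x < (N : Int) →
      (∃ d, d ≤ pvNrc parent + 1 ∧
        pvFix (PySem.List.pySetD parent p2 p1) (pvIter (PySem.List.pySetD parent p2 p1) d x)) ∧
      pvRoot (PySem.List.pySetD parent p2 p1) x =
        (if pvRoot parent x = p2 then p1 else pvRoot parent x) := by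
    intro x hx1 hx2
    obtain ⟨d, hd, hfix⟩ := hP.reach x hx1 hx2
    obtain ⟨d0, hd0le, hfix0, hmin⟩ := pvExists_first (P := fun k => pvFix parent (pvIter parent k x)) d hfix
    have hd0 : d0 ≤ pvNrc parent := le_trans hd0le hd
    have hroot : pvRoot parent x = pvIter parent d0 x :=
      pvFindA_eq_iter parent parent.length d0 x
        (by have := pvNrc_lt hP.pos hP.len hP.top; have := hP.len; omega) hfix0
    have hne_p2 : ∀ j, j < d0 → pvIter parent j x ≠ p2 :=
      fun j hj heq => hmin j hj (by rw [heq]; exact hf2)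
    have hiter : pvIter (PySem.List.pySetD parent p2 p1) d0 x = pvIter parent d0 x :=
      pvIter_set_eq hP p1 p2 h2a h2b d0 x hx1 hx2 hne_p2
    by_cases hcase : pvIter parent d0 x = p2
    · have h5 : pvIter (PySem.List.pySetD parent p2 p1) (d0 + 1) x = p1 := by
        rw [pvIter_succ_right, hiter, hcase, hent p2 h2a, if_pos rfl]
      have hfixp1 : pvFix (PySem.List.pySetD parent p2 p1) p1 := by
        rw [pvFix, hent p1 h1a, if_neg hne]; exact hf1
      refine ⟨⟨d0 + 1, by omega, by rw [h5]; exact hfixp1⟩, ?_⟩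
      rw [if_pos (by rw [hroot]; exact hcase)]
      have := pvFindA_eq_iter (PySem.List.pySetD parent p2 p1)
        (PySem.List.pySetD parent p2 p1).length (d0 + 1) x
        (by rw [hlen']; omega) (by rw [h5]; exact hfixp1)
      rw [pvRoot, this, h5]
    · have hit0 : 0 ≤ pvIter parent d0 x := (pvIter_rng hP.rng d0 x hx1 hx2).1
      have hfix0' : pvFix (PySem.List.pySetD parent p2 p1) (pvIter (PySem.List.pySetD parent p2 p1) d0 x) := by
        rw [hiter, pvFix, hent _ hit0, if_neg hcase]
        exact hfix0
      refine ⟨⟨d0, by omega, hfix0'⟩, ?_⟩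
      rw [if_neg (by rw [hroot]; exact hcase)]
      have := pvFindA_eq_iter (PySem.List.pySetD parent p2 p1)
        (PySem.List.pySetD parent p2 p1).length d0 x
        (by rw [hlen']; omega) hfix0'
      rw [pvRoot, this, hiter, ← hroot]
  refine ⟨⟨hP.pos, hlen', hrng', ?_, htop'⟩, fun x hx1 hx2 => (key x hx1 hx2).2⟩
  intro x hx1 hx2
  obtain ⟨⟨d, hdle, hdfix⟩, _⟩ := key x hx1 hx2
  exact ⟨d, by omega, hdfix⟩

lemma pvMergeB_keys (label : PySem.Dict Int Int) (la lb : Int) :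
    (pvMergeB label la lb).keys = label.keys := by
  unfold pvMergeB
  split
  · show ((label.items.map _).map _) = _
    rw [List.map_map]
    apply List.map_congr_left
    intro p _
    by_cases hp : p.2 = lb <;> simp [hp]
  · rfl

lemma pvMergeB_get? (label : PySem.Dict Int Int) (la lb x : Int) :
    (pvMergeB label la lb).get? x = (label.get? x).map (fun v => if v = lb then la else v) := by
  unfold pvMergeB
  by_cases h : la ≠ lb
  · rw [if_pos h]
    have hg : (fun p : Int × Int => if p.2 = lb then (p.1, la) else p)
        = (fun p : Int × Int => (p.1, if p.2 = lb then la else p.2)) := by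
      funext p; by_cases hp : p.2 = lb <;> simp [hp]
    rw [hg]
    show Option.map _ (List.find? _ (label.items.map _)) = _
    rw [List.find?_map]
    have hpred : ((fun p : Int × Int => p.1 == x) ∘ (fun p : Int × Int => (p.1, if p.2 = lb then la else p.2)))
        = (fun p : Int × Int => p.1 == x) := rfl
    rw [hpred, Option.map_map]
    show _ = Option.map (fun v => if v = lb then la else v)
      (Option.map (fun x : Int × Int => x.2) (List.find? (fun p : Int × Int => p.1 == x) label.items))
    rw [Option.map_map]
    rfl
  · rw [if_neg h]
    have h' : la = lb := not_not.mp h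
    cases hx : label.get? x with
    | none => rfl
    | some v =>
      simp only [Option.map_some]
      rw [h']
      by_cases hv : v = lb
      · rw [if_pos hv, hv]
      · rw [if_neg hv]

lemma pvDict_get?_of_mem_keys (d : PySem.Dict Int Int) (x : Int) (hx : x ∈ d.keys) :
    ∃ v, d.get? x = some v := by
  cases h : d.get? x with
  | none => exact absurd hx ((PySem.Dict.get?_eq_none_iff_not_mem_keys d x).mp h)
  | some v => exact ⟨v, rfl⟩

lemma pvRoot_rng {N : Nat} {parent : List Int} (hP : PInv N parent) (x : Int)
    (h1 : 0 ≤ x) (h2 : x < (N : Int)) :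
    0 ≤ pvRoot parent x ∧ pvRoot parent x < (N : Int) := by
  obtain ⟨d, _, heq, _⟩ := pvRoot_spec hP x h1 h2
  rw [heq]
  exact pvIter_rng hP.rng d x h1 h2

lemma pvEdge_step {N : Nat} {K : List Int} {parent : List Int} {label : PySem.Dict Int Int}
    (hP : PInv N parent)
    (hkeys : label.keys = K)
    (hE : ∀ x ∈ K, label.getD x 0 = pvRoot parent x)
    (hR2 : ∀ x ∈ K, pvRoot parent x ∈ K)
    (hPR : ∀ x : Int, 0 ≤ x → x < (N : Int) → x ∉ K → pvEnt parent x = x)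
    (hKrng : ∀ k ∈ K, 0 ≤ k ∧ k < (N : Int) - 1)
    {a b : Int} (ha : a ∈ K) (hb : b ∈ K) :
    PInv N (pvUnionA parent a b) ∧
    (pvMergeB label (label.getD a 0) (label.getD b 0)).keys = K ∧
    (∀ x ∈ K, (pvMergeB label (label.getD a 0) (label.getD b 0)).getD x 0
        = pvRoot (pvUnionA parent a b) x) ∧
    (∀ x ∈ K, pvRoot (pvUnionA parent a b) x ∈ K) ∧
    (∀ x : Int, 0 ≤ x → x < (N : Int) → x ∉ K → pvEnt (pvUnionA parent a b) x = x) := by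
  have haR := hKrng a ha
  have hbR := hKrng b hb
  have hfa := pvRoot_spec hP a haR.1 (by omega)
  have hfb := pvRoot_spec hP b hbR.1 (by omega)
  have hf1 : pvFix parent (pvRoot parent a) := hfa.choose_spec.2.2
  have hf2 : pvFix parent (pvRoot parent b) := hfb.choose_spec.2.2
  have hr1 := pvRoot_rng hP a haR.1 (by omega)
  have hr2 := pvRoot_rng hP b hbR.1 (by omega)
  have hla : label.getD a 0 = pvRoot parent a := hE a ha
  have hlb : label.getD b 0 = pvRoot parent b := hE b hb
  have hunfold : pvUnionA parent a b =
      if pvRoot parent a ≠ pvRoot parent b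
      then PySem.List.pySetD parent (pvRoot parent b) (pvRoot parent a) else parent := rfl
  by_cases hpp : pvRoot parent a = pvRoot parent b
  · rw [hunfold, if_neg (by simpa using hpp)]
    have hmerge : pvMergeB label (label.getD a 0) (label.getD b 0) = label := by
      unfold pvMergeB
      rw [if_neg (by rw [hla, hlb, hpp]; simp)]
    rw [hmerge, hkeys]
    exact ⟨hP, rfl, hE, hR2, hPR⟩
  · rw [hunfold, if_pos (by simpa using hpp)]
    have htopne : pvRoot parent b ≠ (N : Int) - 1 := by
      have := hKrng _ (hR2 b hb)
      omega
    obtain ⟨hP', hroots'⟩ := pvUnion_effect hP (pvRoot parent a) (pvRoot parent b)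
      hf1 hf2 hpp hr1.1 hr1.2 hr2.1 hr2.2 htopne
    refine ⟨hP', ?_, ?_, ?_, ?_⟩
    · rw [pvMergeB_keys, hkeys]
    · intro x hx
      have hxR := hKrng x hx
      obtain ⟨v, hv⟩ := pvDict_get?_of_mem_keys label x (by rw [hkeys]; exact hx)
      have hvE : v = pvRoot parent x := by
        have := hE x hx
        rwa [PySem.Dict.getD_eq_get?_getD, hv] at this
      rw [PySem.Dict.getD_eq_get?_getD, pvMergeB_get?, hv]
      simp only [Option.map_some, Option.getD_some]
      rw [hvE, hla, hlb, hroots' x hxR.1 (by omega)]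
    · intro x hx
      have hxR := hKrng x hx
      rw [hroots' x hxR.1 (by omega)]
      split
      · exact hR2 a ha
      · exact hR2 x hx
    · intro x hx1 hx2 hxK
      rw [pvEnt_set hP.len _ _ hr2.1 hr2.2 x hx1,
        if_neg (fun h => hxK (by rw [h]; exact hR2 b hb)), hPR x hx1 hx2 hxK]

def pvCells (m n : Int) : List (Int × Int) :=
  (PySem.List.pyRange 0 m 1).flatMap (fun i => (PySem.List.pyRange 0 n 1).map (fun j => (i, j)))

def pvIdx (n : Int) (c : Int × Int) : Int := c.1 * n + c.2

def pvStepA (n : Int) (grid2 : List (List Int)) (parent : List Int) (c : Int × Int) : List Int :=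
  if pvG grid2 c.1 c.2 = 0 then parent
  else
    let idx := c.1 * n + c.2
    let parent1 := if 0 < c.1 ∧ pvG grid2 (c.1 - 1) c.2 = 1 then pvUnionA parent (idx - n) idx else parent
    if 0 < c.2 ∧ pvG grid2 c.1 (c.2 - 1) = 1 then pvUnionA parent1 (idx - 1) idx else parent1

def pvStepB (n : Int) (grid2 : List (List Int)) (label : PySem.Dict Int Int) (c : Int × Int) :
    PySem.Dict Int Int :=
  if pvG grid2 c.1 c.2 = 0 then label
  else
    let idx := c.1 * n + c.2
    let label1 := label.insert idx idx
    let label2 := if 0 < c.1 ∧ pvG grid2 (c.1 - 1) c.2 = 1 then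
        pvMergeB label1 (label1.getD (idx - n) 0) (label1.getD idx 0) else label1
    if 0 < c.2 ∧ pvG grid2 c.1 (c.2 - 1) = 1 then
        pvMergeB label2 (label2.getD (idx - 1) 0) (label2.getD idx 0) else label2

def pvKeysOf (n : Int) (grid2 : List (List Int)) (S : List (Int × Int)) : List Int :=
  (S.filter (fun c => pvG grid2 c.1 c.2 != 0)).map (pvIdx n)

def Rel1 (N : Nat) (n : Int) (grid2 : List (List Int)) (S : List (Int × Int))
    (parent : List Int) (label : PySem.Dict Int Int) : Prop :=
  PInv N parent ∧
  label.keys = pvKeysOf n grid2 S ∧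
  (∀ x ∈ pvKeysOf n grid2 S, label.getD x 0 = pvRoot parent x) ∧
  (∀ x ∈ pvKeysOf n grid2 S, pvRoot parent x ∈ pvKeysOf n grid2 S) ∧
  (∀ x : Int, 0 ≤ x → x < (N : Int) → x ∉ pvKeysOf n grid2 S → pvEnt parent x = x)

lemma pvMem_cells {m n : Int} {c : Int × Int} :
    c ∈ pvCells m n ↔ (0 ≤ c.1 ∧ c.1 < m ∧ 0 ≤ c.2 ∧ c.2 < n) := by
  obtain ⟨i, j⟩ := c
  simp only [pvCells, List.mem_flatMap, List.mem_map, PySem.List.mem_pyRange_one]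
  constructor
  · rintro ⟨a, ⟨h1, h2⟩, b, ⟨h3, h4⟩, heq⟩
    cases heq
    exact ⟨h1, h2, h3, h4⟩
  · rintro ⟨h1, h2, h3, h4⟩
    exact ⟨i, ⟨h1, h2⟩, j, ⟨h3, h4⟩, rfl⟩

lemma pvIdx_bounds {m n : Int} {c : Int × Int} (h : c ∈ pvCells m n) :
    0 ≤ pvIdx n c ∧ pvIdx n c < m * n := by
  rw [pvMem_cells] at h
  obtain ⟨h1, h2, h3, h4⟩ := h
  constructor
  · have := mul_nonneg h1 (le_trans h3 (le_of_lt h4))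
    unfold pvIdx; omega
  · have hkey : (m - 1 - c.1) * n ≥ 0 := mul_nonneg (by omega) (by omega)
    unfold pvIdx; nlinarith

lemma pvCells_pairwise (m n : Int) :
    (pvCells m n).Pairwise (fun c d => pvIdx n c < pvIdx n d) := by
  unfold pvCells
  rw [List.pairwise_flatMap]
  constructor
  · intro i _
    rw [List.pairwise_map]
    apply List.Pairwise.imp ?_ (PySem.List.pairwise_lt_pyRange_one 0 n)
    intro a b hab
    unfold pvIdx
    simp only
    omega
  · apply List.Pairwise.imp ?_ (PySem.List.pairwise_lt_pyRange_one 0 m)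
    intro i1 i2 h12 x hx y hy
    simp only [List.mem_map, PySem.List.mem_pyRange_one] at hx hy
    obtain ⟨j1, ⟨hj1a, hj1b⟩, rfl⟩ := hx
    obtain ⟨j2, ⟨hj2a, hj2b⟩, rfl⟩ := hy
    unfold pvIdx
    simp only
    have hkey : (i2 - i1 - 1) * n ≥ 0 := mul_nonneg (by omega) (by omega)
    nlinarith

lemma pvKeysOf_append_zero {n : Int} {grid2 : List (List Int)} {S : List (Int × Int)}
    {c : Int × Int} (h : pvG grid2 c.1 c.2 = 0) :
    pvKeysOf n grid2 (S ++ [c]) = pvKeysOf n grid2 S := by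
  unfold pvKeysOf
  rw [List.filter_append]
  simp [h]

lemma pvKeysOf_append_nonzero {n : Int} {grid2 : List (List Int)} {S : List (Int × Int)}
    {c : Int × Int} (h : ¬ pvG grid2 c.1 c.2 = 0) :
    pvKeysOf n grid2 (S ++ [c]) = pvKeysOf n grid2 S ++ [pvIdx n c] := by
  unfold pvKeysOf
  rw [List.filter_append]
  simp [h]

lemma pvKeysOf_mem {n : Int} {grid2 : List (List Int)} {S : List (Int × Int)} {x : Int}
    (h : x ∈ pvKeysOf n grid2 S) : ∃ s ∈ S, pvIdx n s = x := by
  unfold pvKeysOf at h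
  rw [List.mem_map] at h
  obtain ⟨s, hs, heq⟩ := h
  exact ⟨s, List.mem_of_mem_filter hs, heq⟩

lemma pvCell_step {m n : Int} {grid2 : List (List Int)} {N : Nat} (hN : (N : Int) = m * n + 1)
    {S cs : List (Int × Int)} {c : Int × Int} (hsplit : pvCells m n = S ++ c :: cs)
    {parent : List Int} {label : PySem.Dict Int Int}
    (hRel : Rel1 N n grid2 S parent label) :
    Rel1 N n grid2 (S ++ [c]) (pvStepA n grid2 parent c) (pvStepB n grid2 label c) := by
  obtain ⟨hP, hkeys, hE, hR2, hPR⟩ := hRel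
  have hc_mem : c ∈ pvCells m n := by rw [hsplit]; simp
  have hcb := pvMem_cells.mp hc_mem
  have hcidx := pvIdx_bounds hc_mem
  have pw := pvCells_pairwise m n
  rw [hsplit, List.pairwise_append] at pw
  obtain ⟨pwS, pwRest, hcross⟩ := pw
  have hS : ∀ s ∈ S, pvIdx n s < pvIdx n c := fun s hs => hcross s hs c (by simp)
  have hcs : ∀ d ∈ cs, pvIdx n c < pvIdx n d := (List.pairwise_cons.mp pwRest).1
  by_cases h0 : pvG grid2 c.1 c.2 = 0
  · unfold pvStepA pvStepB
    rw [if_pos h0, if_pos h0, Rel1, pvKeysOf_append_zero h0]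
    exact ⟨hP, hkeys, hE, hR2, hPR⟩
  · -- keys facts
    have hKlt : ∀ x ∈ pvKeysOf n grid2 S, x < pvIdx n c := by
      intro x hx
      obtain ⟨s, hsS, rfl⟩ := pvKeysOf_mem hx
      exact hS s hsS
    have hKrngS : ∀ k ∈ pvKeysOf n grid2 S, 0 ≤ k ∧ k < (N : Int) - 1 := by
      intro k hk
      obtain ⟨s, hsS, rfl⟩ := pvKeysOf_mem hk
      have hsc : s ∈ pvCells m n := by rw [hsplit]; exact List.mem_append_left _ hsS
      have := pvIdx_bounds hsc
      omega
    have hfresh : pvIdx n c ∉ pvKeysOf n grid2 S := fun h => absurd (hKlt _ h) (lt_irrefl _)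
    have hidxrng : 0 ≤ pvIdx n c ∧ pvIdx n c < (N : Int) - 1 := by omega
    set K1 := pvKeysOf n grid2 S ++ [pvIdx n c] with hK1
    have hKrng1 : ∀ k ∈ K1, 0 ≤ k ∧ k < (N : Int) - 1 := by
      intro k hk
      rw [hK1, List.mem_append, List.mem_singleton] at hk
      rcases hk with hk | rfl
      · exact hKrngS k hk
      · exact hidxrng
    -- state after the fresh insert
    have hcont : label.contains (pvIdx n c) = false := by
      cases hc2 : label.contains (pvIdx n c) with
      | false => rfl
      | true => exact absurd ((PySem.Dict.contains_iff_mem_keys _ _).mp hc2) (hkeys ▸ hfresh)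
    have hrootidx : pvRoot parent (pvIdx n c) = pvIdx n c :=
      pvRoot_of_fix hP _ (hPR _ hidxrng.1 (by omega) hfresh)
    have hkeys1 : (label.insert (pvIdx n c) (pvIdx n c)).keys = K1 := by
      rw [PySem.Dict.keys_insert_of_not_contains _ _ hcont, hkeys]
    have hE1 : ∀ x ∈ K1, (label.insert (pvIdx n c) (pvIdx n c)).getD x 0 = pvRoot parent x := by
      intro x hx
      rw [hK1, List.mem_append, List.mem_singleton] at hx
      rcases hx with hx | rfl
      · rw [PySem.Dict.getD_insert, if_neg (by intro h; exact hfresh (h ▸ hx)), hE x hx]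
      · rw [PySem.Dict.getD_insert, if_pos rfl, hrootidx]
    have hR21 : ∀ x ∈ K1, pvRoot parent x ∈ K1 := by
      intro x hx
      rw [hK1, List.mem_append, List.mem_singleton] at hx
      rcases hx with hx | rfl
      · exact List.mem_append_left _ (hR2 x hx)
      · rw [hrootidx]; exact List.mem_append_right _ (by simp)
    have hPR1 : ∀ x : Int, 0 ≤ x → x < (N : Int) → x ∉ K1 → pvEnt parent x = x := by
      intro x h1 h2 hx
      exact hPR x h1 h2 (fun h => hx (List.mem_append_left _ h))
    -- up edge
    have hup_mem : 0 < c.1 → pvG grid2 (c.1 - 1) c.2 = 1 → (pvIdx n c - n) ∈ K1 := by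
      intro hi hg
      have hu_mem : ((c.1 - 1, c.2) : Int × Int) ∈ pvCells m n :=
        pvMem_cells.mpr (by simp; omega)
      have hu_idx : pvIdx n (c.1 - 1, c.2) = pvIdx n c - n := by unfold pvIdx; ring
      have hu_S : ((c.1 - 1, c.2) : Int × Int) ∈ S := by
        rw [hsplit] at hu_mem
        rcases List.mem_append.mp hu_mem with h | h
        · exact h
        · rcases List.mem_cons.mp h with h | h
          · exfalso
            have : c.1 - 1 = c.1 := congrArg Prod.fst h
            omega
          · exfalso
            have := hcs _ h
            rw [hu_idx] at this
            have hn : 0 < n := by omega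
            omega
      apply List.mem_append_left
      rw [← hu_idx]
      unfold pvKeysOf
      rw [List.mem_map]
      exact ⟨(c.1 - 1, c.2), List.mem_filter.mpr ⟨hu_S, by simp [hg]⟩, rfl⟩
    -- left edge
    have hleft_mem : 0 < c.2 → pvG grid2 c.1 (c.2 - 1) = 1 → (pvIdx n c - 1) ∈ K1 := by
      intro hj hg
      have hu_mem : ((c.1, c.2 - 1) : Int × Int) ∈ pvCells m n :=
        pvMem_cells.mpr (by simp; omega)
      have hu_idx : pvIdx n (c.1, c.2 - 1) = pvIdx n c - 1 := by unfold pvIdx; ring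
      have hu_S : ((c.1, c.2 - 1) : Int × Int) ∈ S := by
        rw [hsplit] at hu_mem
        rcases List.mem_append.mp hu_mem with h | h
        · exact h
        · rcases List.mem_cons.mp h with h | h
          · exfalso
            have : c.2 - 1 = c.2 := congrArg Prod.snd h
            omega
          · exfalso
            have := hcs _ h
            rw [hu_idx] at this
            omega
      apply List.mem_append_left
      rw [← hu_idx]
      unfold pvKeysOf
      rw [List.mem_map]
      exact ⟨(c.1, c.2 - 1), List.mem_filter.mpr ⟨hu_S, by simp [hg]⟩, rfl⟩
    have hidx_K1 : pvIdx n c ∈ K1 := List.mem_append_right _ (by simp)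
    -- chain through the two conditional edges
    unfold pvStepA pvStepB
    rw [if_neg h0, if_neg h0]
    simp only
    have step2 :
        ∀ parent' label', PInv N parent' → label'.keys = K1 →
          (∀ x ∈ K1, label'.getD x 0 = pvRoot parent' x) →
          (∀ x ∈ K1, pvRoot parent' x ∈ K1) →
          (∀ x : Int, 0 ≤ x → x < (N : Int) → x ∉ K1 → pvEnt parent' x = x) →
          Rel1 N n grid2 (S ++ [c])
            (if 0 < c.2 ∧ pvG grid2 c.1 (c.2 - 1) = 1 then
              pvUnionA parent' (c.1 * n + c.2 - 1) (c.1 * n + c.2) else parent')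
            (if 0 < c.2 ∧ pvG grid2 c.1 (c.2 - 1) = 1 then
              pvMergeB label' (label'.getD (c.1 * n + c.2 - 1) 0) (label'.getD (c.1 * n + c.2) 0)
              else label') := by
      intro parent' label' hP' hkeys' hE' hR2' hPR'
      have hKof : pvKeysOf n grid2 (S ++ [c]) = K1 := pvKeysOf_append_nonzero h0
      by_cases hleft : 0 < c.2 ∧ pvG grid2 c.1 (c.2 - 1) = 1
      · rw [if_pos hleft, if_pos hleft]
        have ha : (c.1 * n + c.2 - 1) ∈ K1 := hleft_mem hleft.1 hleft.2
        have hb : (c.1 * n + c.2) ∈ K1 := hidx_K1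
        obtain ⟨x1, x2, x3, x4, x5⟩ := pvEdge_step hP' hkeys' hE' hR2' hPR' hKrng1 ha hb
        rw [Rel1, hKof]
        exact ⟨x1, x2, x3, x4, x5⟩
      · rw [if_neg hleft, if_neg hleft, Rel1, hKof]
        exact ⟨hP', hkeys', hE', hR2', hPR'⟩
    by_cases hup : 0 < c.1 ∧ pvG grid2 (c.1 - 1) c.2 = 1
    · rw [if_pos hup, if_pos hup]
      have ha : (c.1 * n + c.2 - n) ∈ K1 := hup_mem hup.1 hup.2
      obtain ⟨x1, x2, x3, x4, x5⟩ :=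
        pvEdge_step (label := label.insert (pvIdx n c) (pvIdx n c)) hP hkeys1 hE1 hR21 hPR1
          hKrng1 (a := c.1 * n + c.2 - n) (b := c.1 * n + c.2) ha hidx_K1
      exact step2 _ _ x1 x2 x3 x4 x5
    · rw [if_neg hup, if_neg hup]
      exact step2 _ _ hP hkeys1 hE1 hR21 hPR1

lemma pvPhase1 {m n : Int} {grid2 : List (List Int)} {N : Nat} (hN : (N : Int) = m * n + 1) :
    ∀ (cs S : List (Int × Int)) (parent : List Int) (label : PySem.Dict Int Int),
      pvCells m n = S ++ cs → Rel1 N n grid2 S parent label →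
      Rel1 N n grid2 (pvCells m n)
        (cs.foldl (pvStepA n grid2) parent) (cs.foldl (pvStepB n grid2) label) := by
  intro cs
  induction cs with
  | nil =>
    intro S parent label hsplit hRel
    rw [List.append_nil] at hsplit
    rw [hsplit]
    exact hRel
  | cons c cs ih =>
    intro S parent label hsplit hRel
    simp only [List.foldl_cons]
    exact ih (S ++ [c]) _ _ (by rw [hsplit, List.append_assoc]; rfl)
      (pvCell_step hN hsplit hRel)

lemma pvInit_ent {m n : Int} (x : Int) (h1 : 0 ≤ x) (h2 : x < m * n + 1) :
    pvEnt (PySem.List.pyRange 0 (m * n + 1) 1) x = x := by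
  rw [pvEnt, PySem.List.pyGetD_of_nonneg _ _ h1, List.getD_eq_getElem?_getD,
    List.getElem?_eq_getElem (by rw [PySem.List.length_pyRange_one]; omega),
    PySem.List.getElem_pyRange_one]
  simp
  omega

lemma pvInit_PInv {m n : Int} {N : Nat} (hN : (N : Int) = m * n + 1) (hmn : 0 ≤ m * n) :
    PInv N (PySem.List.pyRange 0 (m * n + 1) 1) := by
  have hlen : (PySem.List.pyRange 0 (m * n + 1) 1).length = N := by
    rw [PySem.List.length_pyRange_one]; omega
  refine ⟨by omega, hlen, ?_, ?_, ?_⟩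
  · intro x hx1 hx2
    rw [pvInit_ent x hx1 (by omega)]
    exact ⟨hx1, hx2⟩
  · intro x hx1 hx2
    exact ⟨0, Nat.zero_le _, pvInit_ent x hx1 (by omega)⟩
  · exact pvInit_ent _ (by omega) (by omega)

def pvStep2A (n : Int) (grid1 grid2 : List (List Int)) (parent : List Int)
    (st : PySem.Set Int × PySem.Set Int) (c : Int × Int) : PySem.Set Int × PySem.Set Int :=
  if pvG grid2 c.1 c.2 = 1 then
    let root := pvFindA parent parent.length (c.1 * n + c.2)
    let res := PySem.Set.add st.1 root
    if (pvG grid1 c.1 c.2 = 0 ∧ PySem.Set.contains res root) ∨ PySem.Set.contains st.2 root then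
      ((PySem.Set.remove? res root).getD res, PySem.Set.add st.2 root)
    else (res, st.2)
  else st

def pvStep2B (n : Int) (grid1 grid2 : List (List Int)) (label : PySem.Dict Int Int)
    (good : PySem.Dict Int Bool) (c : Int × Int) : PySem.Dict Int Bool :=
  if pvG grid2 c.1 c.2 = 1 then
    let L := label.getD (c.1 * n + c.2) 0
    good.insert L (good.getD L true && decide (pvG grid1 c.1 c.2 ≠ 0))
  else good

def QInv (res ab : PySem.Set Int) (good : PySem.Dict Int Bool) : Prop :=
  res.Nodup ∧ ab.Nodup ∧ good.keys.Nodup ∧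
  ∀ r : Int, (good.get? r = some true ↔ r ∈ res) ∧ (good.get? r = some false ↔ r ∈ ab)

lemma pvSet_contains_iff {s : PySem.Set Int} {x : Int} :
    PySem.Set.contains s x = true ↔ x ∈ s := by
  simp [PySem.Set.contains]

lemma pvDict_getD_true {good : PySem.Dict Int Bool} {r : Int}
    (h : good.get? r ≠ some false) : good.getD r true = true := by
  rw [PySem.Dict.getD_eq_get?_getD]
  cases hg : good.get? r with
  | none => rfl
  | some b => cases b with
    | false => exact absurd hg h
    | true => rfl

lemma pvQ_step_taken {res ab : PySem.Set Int} {good : PySem.Dict Int Bool} (r v : Int)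
    (hQ : QInv res ab good) (hcond : v = 0 ∨ PySem.Set.contains ab r = true) :
    QInv (PySem.Set.discard (PySem.Set.add res r) r) (PySem.Set.add ab r)
      (good.insert r (good.getD r true && decide (v ≠ 0))) := by
  obtain ⟨hres, hab, hknd, hchar⟩ := hQ
  have hmem_disc : ∀ x : Int, x ∈ PySem.Set.discard (PySem.Set.add res r) r ↔ x ∈ res ∧ x ≠ r := by
    intro x
    rw [PySem.Set.mem_discard, PySem.Set.mem_add]
    constructor
    · rintro ⟨h | h, hne⟩
      · exact ⟨h, hne⟩
      · exact absurd h hne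
    · rintro ⟨h, hne⟩
      exact ⟨Or.inl h, hne⟩
  have hval : (good.getD r true && decide (v ≠ 0)) = false := by
    rcases hcond with h | h
    · simp [h]
    · have hrab : r ∈ ab := pvSet_contains_iff.mp h
      rw [PySem.Dict.getD_eq_get?_getD, (hchar r).2.mpr hrab]
      rfl
  have hget_self : (good.insert r (good.getD r true && decide (v ≠ 0))).get? r
      = some false := by rw [PySem.Dict.get?_insert_self, hval]
  refine ⟨PySem.Set.nodup_discard _ _ (PySem.Set.nodup_add res r hres),
    PySem.Set.nodup_add ab r hab, PySem.Dict.nodup_keys_insert _ _ _ hknd, ?_⟩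
  intro x
  by_cases hx : x = r
  · subst hx
    refine ⟨⟨fun h => ?_, fun h => ?_⟩, ⟨fun _ => (PySem.Set.mem_add ab x x).mpr (Or.inr rfl),
      fun _ => hget_self⟩⟩
    · rw [hget_self] at h
      exact absurd (Option.some.inj h) (by simp)
    · exact absurd ((hmem_disc x).mp h).2 (by simp)
  · rw [PySem.Dict.get?_insert_of_ne good _ hx, hmem_disc x, PySem.Set.mem_add]
    refine ⟨?_, ?_⟩
    · rw [(hchar x).1]
      exact ⟨fun h => ⟨h, hx⟩, fun h => h.1⟩
    · rw [(hchar x).2]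
      constructor
      · intro h; exact Or.inl h
      · rintro (h | h)
        · exact h
        · exact absurd h hx

lemma pvQ_step_not {res ab : PySem.Set Int} {good : PySem.Dict Int Bool} (r v : Int)
    (hQ : QInv res ab good) (hv : ¬ v = 0) (habc : PySem.Set.contains ab r = false) :
    QInv (PySem.Set.add res r) ab
      (good.insert r (good.getD r true && decide (v ≠ 0))) := by
  obtain ⟨hres, hab, hknd, hchar⟩ := hQ
  have hrab : r ∉ ab := fun h => by rw [pvSet_contains_iff.mpr h] at habc; cases habc
  have hval : (good.getD r true && decide (v ≠ 0)) = true := by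
    rw [pvDict_getD_true (fun h => hrab ((hchar r).2.mp h))]
    simp [hv]
  have hget_self : (good.insert r (good.getD r true && decide (v ≠ 0))).get? r
      = some true := by rw [PySem.Dict.get?_insert_self, hval]
  refine ⟨PySem.Set.nodup_add res r hres, hab, PySem.Dict.nodup_keys_insert _ _ _ hknd, ?_⟩
  intro x
  by_cases hx : x = r
  · subst hx
    refine ⟨⟨fun _ => (PySem.Set.mem_add res x x).mpr (Or.inr rfl), fun _ => hget_self⟩,
      ⟨fun h => ?_, fun h => absurd h hrab⟩⟩
    rw [hget_self] at h
    exact absurd (Option.some.inj h) (by simp)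
  · rw [PySem.Dict.get?_insert_of_ne good _ hx, PySem.Set.mem_add]
    refine ⟨?_, (hchar x).2⟩
    rw [(hchar x).1]
    constructor
    · intro h; exact Or.inl h
    · rintro (h | h)
      · exact h
      · exact absurd h hx

lemma pvPhase2 {m n : Int} {grid1 grid2 : List (List Int)} {parent : List Int}
    {label : PySem.Dict Int Int}
    (hagree : ∀ c ∈ pvCells m n, pvG grid2 c.1 c.2 = 1 →
      label.getD (c.1 * n + c.2) 0 = pvFindA parent parent.length (c.1 * n + c.2)) :
    ∀ cs : List (Int × Int), (∀ c ∈ cs, c ∈ pvCells m n) →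
      ∀ (res ab : PySem.Set Int) (good : PySem.Dict Int Bool), QInv res ab good →
      QInv (cs.foldl (pvStep2A n grid1 grid2 parent) (res, ab)).1
        (cs.foldl (pvStep2A n grid1 grid2 parent) (res, ab)).2
        (cs.foldl (pvStep2B n grid1 grid2 label) good) := by
  intro cs
  induction cs with
  | nil => intro _ res ab good hQ; exact hQ
  | cons c cs ih =>
    intro hmem res ab good hQ
    simp only [List.foldl_cons]
    have hstep : QInv (pvStep2A n grid1 grid2 parent (res, ab) c).1
        (pvStep2A n grid1 grid2 parent (res, ab) c).2
        (pvStep2B n grid1 grid2 label good c) := by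
      unfold pvStep2A pvStep2B
      by_cases hg2 : pvG grid2 c.1 c.2 = 1
      · rw [if_pos hg2, if_pos hg2]
        simp only
        rw [← hagree c (hmem c (by simp)) hg2]
        set r := label.getD (c.1 * n + c.2) 0 with hr
        by_cases hcond : (pvG grid1 c.1 c.2 = 0 ∧
            PySem.Set.contains (PySem.Set.add res r) r = true) ∨ PySem.Set.contains ab r = true
        · rw [if_pos hcond]
          have hremove : PySem.Set.remove? (PySem.Set.add res r) r
              = some (PySem.Set.discard (PySem.Set.add res r) r) := by
            rw [PySem.Set.remove?, if_pos (pvSet_contains_iff.mpr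
              ((PySem.Set.mem_add res r r).mpr (Or.inr rfl)))]
          have := pvQ_step_taken (good := good) r (pvG grid1 c.1 c.2) hQ
            (by rcases hcond with h | h
                · exact Or.inl h.1
                · exact Or.inr h)
          simpa [hremove] using this
        · rw [if_neg hcond]
          have hv : ¬ pvG grid1 c.1 c.2 = 0 := by
            intro h
            exact hcond (Or.inl ⟨h, pvSet_contains_iff.mpr
              ((PySem.Set.mem_add res r r).mpr (Or.inr rfl))⟩)
          have habc : PySem.Set.contains ab r = false := by
            cases h : PySem.Set.contains ab r with
            | false => rfl
            | true => exact absurd (Or.inr h) hcond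
          exact pvQ_step_not r (pvG grid1 c.1 c.2) hQ hv habc
      · rw [if_neg hg2, if_neg hg2]
        exact hQ
    have := ih (fun c hc => hmem c (by simp [hc]))
      (pvStep2A n grid1 grid2 parent (res, ab) c).1
      (pvStep2A n grid1 grid2 parent (res, ab) c).2
      (pvStep2B n grid1 grid2 label good c) hstep
    simpa using this

lemma pvCount {res ab : PySem.Set Int} {good : PySem.Dict Int Bool}
    (hQ : QInv res ab good) :
    (good.values.map (fun b => if b then (1 : Int) else 0)).sum = (res.length : Int) := by
  obtain ⟨hres, _, hknd, hchar⟩ := hQ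
  rw [PySem.Dict.values_eq_map_keys good hknd false, List.map_map]
  have hmap : ((fun b : Bool => if b then (1 : Int) else 0) ∘ (fun k => good.getD k false))
      = (fun k => if (fun k => good.getD k false) k = true then (1 : Int) else 0) := rfl
  rw [hmap, PySem.List.sum_map_ite_one_zero (fun k => good.getD k false) good.keys]
  congr 1
  rw [List.countP_eq_length_filter]
  have hgetD : ∀ x : Int, (good.getD x false = true) ↔ good.get? x = some true := by
    intro x
    rw [PySem.Dict.getD_eq_get?_getD]
    cases hg : good.get? x with
    | none => simp
    | some b => simp
  have hmemf : ∀ x : Int, x ∈ good.keys.filter (fun k => good.getD k false) ↔ x ∈ res := by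
    intro x
    rw [List.mem_filter]
    constructor
    · rintro ⟨_, hx⟩
      exact (hchar x).1.mp ((hgetD x).mp hx)
    · intro hx
      have hg : good.get? x = some true := (hchar x).1.mpr hx
      refine ⟨?_, (hgetD x).mpr hg⟩
      by_contra hk
      rw [(PySem.Dict.get?_eq_none_iff_not_mem_keys good x).mpr hk] at hg
      cases hg
  exact ((List.perm_ext_iff_of_nodup (List.Nodup.filter _ hknd) hres).mpr hmemf).length_eq

lemma pvLoop1A_eq (grid2 : List (List Int)) (m n : Int) (init : List Int) :
    ((PySem.List.pyRange 0 m 1).foldl (fun parent i =>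
      (PySem.List.pyRange 0 n 1).foldl (fun parent j =>
        if pvG grid2 i j = 0 then parent
        else
          let idx := i * n + j
          let parent := if 0 < i ∧ pvG grid2 (i - 1) j = 1 then pvUnionA parent (idx - n) idx else parent
          if 0 < j ∧ pvG grid2 i (j - 1) = 1 then pvUnionA parent (idx - 1) idx else parent)
        parent) init)
      = (pvCells m n).foldl (pvStepA n grid2) init := by
  rw [pvCells, List.foldl_flatMap]
  congr 1
  funext acc i
  rw [List.foldl_map]
  rfl

lemma pvLoop1B_eq (grid2 : List (List Int)) (m n : Int) (init : PySem.Dict Int Int) :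
    ((PySem.List.pyRange 0 m 1).foldl (fun label i =>
      (PySem.List.pyRange 0 n 1).foldl (fun label j =>
        if pvG grid2 i j = 0 then label
        else
          let idx := i * n + j
          let label1 := label.insert idx idx
          let label2 := if 0 < i ∧ pvG grid2 (i - 1) j = 1 then
              pvMergeB label1 (label1.getD (idx - n) 0) (label1.getD idx 0) else label1
          if 0 < j ∧ pvG grid2 i (j - 1) = 1 then
              pvMergeB label2 (label2.getD (idx - 1) 0) (label2.getD idx 0) else label2)
        label) init)
      = (pvCells m n).foldl (pvStepB n grid2) init := by
  rw [pvCells, List.foldl_flatMap]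
  congr 1
  funext acc i
  rw [List.foldl_map]
  rfl

lemma pvLoop2A_eq (grid1 grid2 : List (List Int)) (m n : Int) (parent : List Int)
    (init : PySem.Set Int × PySem.Set Int) :
    ((PySem.List.pyRange 0 m 1).foldl (fun st i =>
      (PySem.List.pyRange 0 n 1).foldl (fun st j =>
        if pvG grid2 i j = 1 then
          let root := pvFindA parent parent.length (i * n + j)
          let res := PySem.Set.add st.1 root
          if (pvG grid1 i j = 0 ∧ PySem.Set.contains res root) ∨ PySem.Set.contains st.2 root then
            ((PySem.Set.remove? res root).getD res, PySem.Set.add st.2 root)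
          else (res, st.2)
        else st) st) init)
      = (pvCells m n).foldl (pvStep2A n grid1 grid2 parent) init := by
  rw [pvCells, List.foldl_flatMap]
  congr 1
  funext acc i
  rw [List.foldl_map]
  rfl

lemma pvLoop2B_eq (grid1 grid2 : List (List Int)) (m n : Int) (label : PySem.Dict Int Int)
    (init : PySem.Dict Int Bool) :
    ((PySem.List.pyRange 0 m 1).foldl (fun good i =>
      (PySem.List.pyRange 0 n 1).foldl (fun good j =>
        if pvG grid2 i j = 1 then
          let L := label.getD (i * n + j) 0
          good.insert L (good.getD L true && decide (pvG grid1 i j ≠ 0))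
        else good) good) init)
      = (pvCells m n).foldl (pvStep2B n grid1 grid2 label) init := by
  rw [pvCells, List.foldl_flatMap]
  congr 1
  funext acc i
  rw [List.foldl_map]
  rfl

lemma pvMain (grid1 grid2 : List (List Int)) :
    countSubIslands1 grid1 grid2 = countSubIslands1_alt grid1 grid2 := by
  simp only [countSubIslands1, countSubIslands1_alt]
  rw [pvLoop1A_eq, pvLoop1B_eq, pvLoop2A_eq, pvLoop2B_eq]
  set m := PySem.List.len grid1 with hm
  set n := PySem.List.len (PySem.List.pyGetD grid1 0 []) with hn
  have h0m : (0 : Int) ≤ m := by rw [hm, PySem.List.len_eq]; exact Int.natCast_nonneg _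
  have h0n : (0 : Int) ≤ n := by rw [hn, PySem.List.len_eq]; exact Int.natCast_nonneg _
  have h0mn : 0 ≤ m * n := mul_nonneg h0m h0n
  set N := (m * n + 1).toNat with hNdef
  have hN : (N : Int) = m * n + 1 := by rw [hNdef]; omega
  set parentF := (pvCells m n).foldl (pvStepA n grid2) (PySem.List.pyRange 0 (m * n + 1) 1)
    with hparentF
  set labelF := (pvCells m n).foldl (pvStepB n grid2) PySem.Dict.empty with hlabelF
  have hRel0 : Rel1 N n grid2 [] (PySem.List.pyRange 0 (m * n + 1) 1) PySem.Dict.empty := by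
    refine ⟨pvInit_PInv hN h0mn, rfl, ?_, ?_, ?_⟩
    · intro x hx; cases hx
    · intro x hx; cases hx
    · intro x hx1 hx2 _; exact pvInit_ent x hx1 (by omega)
  have hRelF : Rel1 N n grid2 (pvCells m n) parentF labelF :=
    pvPhase1 hN (pvCells m n) [] _ _ rfl hRel0
  obtain ⟨hPF, hkeysF, hEF, _, _⟩ := hRelF
  have hagree : ∀ c ∈ pvCells m n, pvG grid2 c.1 c.2 = 1 →
      labelF.getD (c.1 * n + c.2) 0 = pvFindA parentF parentF.length (c.1 * n + c.2) := by
    intro c hc hg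
    have hidx_mem : (c.1 * n + c.2) ∈ pvKeysOf n grid2 (pvCells m n) := by
      unfold pvKeysOf
      rw [List.mem_map]
      exact ⟨c, List.mem_filter.mpr ⟨hc, by simp [hg]⟩, rfl⟩
    exact hEF _ hidx_mem
  have hQ0 : QInv PySem.Set.empty PySem.Set.empty PySem.Dict.empty := by
    refine ⟨List.nodup_nil, List.nodup_nil, List.nodup_nil, ?_⟩
    intro r
    constructor <;>
      exact ⟨fun h => by simp [PySem.Dict.get?, PySem.Dict.empty] at h,
        fun h => by simp [PySem.Set.empty] at h⟩
  have hQF := pvPhase2 (grid1 := grid1) hagree (pvCells m n) (fun c hc => hc)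
    PySem.Set.empty PySem.Set.empty PySem.Dict.empty hQ0
  exact (pvCount hQF).symm

-- ===== VERDICT (by name: the statement is the Claim_ definition above) =====
theorem countSubIslands1_spec : Claim_equal_countSubIslands1 := by
  intro grid1 grid2 _ _
  show countSubIslands1 grid1 grid2 = countSubIslands1_alt grid1 grid2
  exact pvMain grid1 grid2
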